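-- pv_equiv track=rewrite | github.com/reynaldoivory/gta-online-database | scripts/fix_make_model_issues.py | extract_make_from_model
-- ===== SOURCE A (Python) =====
-- KNOWN_MAKES = {
--     'audi', 'bmw', 'mercedes-benz', 'mercedes', 'porsche', 'volkswagen', 'vw',
--     'ford', 'chevrolet', 'chevy', 'dodge', 'chrysler', 'cadillac', 'buick',
--     'pontiac', 'lincoln', 'gmc', 'jeep', 'ram', 'tesla', 'nissan', 'toyota',
--     'honda', 'mazda', 'subaru', 'mitsubishi', 'lexus', 'infiniti', 'acura',
--     'hyundai', 'kia', 'ferrari', 'lamborghini', 'mclaren', 'aston martin',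
--     'bentley', 'rolls-royce', 'rolls royce', 'jaguar', 'land rover', 'range rover',
--     'maserati', 'alfa romeo', 'bugatti', 'koenigsegg', 'pagani', 'lotus',
--     'suzuki', 'yamaha', 'kawasaki', 'ducati', 'harley-davidson', 'harley davidson',
--     'indian', 'triumph', 'aprilia', 'mv agusta', 'ktm', 'husqvarna',
--     'boeing', 'sikorsky', 'airbus', 'cessna', 'piper', 'bell', 'eurocopter',
--     'peterbilt', 'kenworth', 'mack', 'international', 'freightliner', 'volvo',
--     'man', 'iveco', 'scania', 'daimler', 'hummer', 'gurkha', 'terradyne',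
--     'howe', 'dartz', 'lenco', 'inkas', 'brabus', 'hennessey', 'saleen',
--     'ruf', 'mansory', 'novitec', 'liberty walk', 'rocket bunny', 'widebody'
-- }
--
-- def extract_make_from_model(model_text):
--     """Try to extract make from model field if it's incorrectly placed"""
--     if not model_text:
--         return None, model_text
--
--     model_lower = model_text.lower()
--
--     # Check for common patterns like "Make Model" or "Make-Model"
--     # Sort by length (longest first) to match multi-word makes first
--     sorted_makes = sorted(KNOWN_MAKES, key=len, reverse=True)
--
--     for make in sorted_makes:
--         make_words = make.split()
--         # Check if make appears at start of model
--         if model_lower.startswith(make):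
--             # Extract the make and remaining model
--             remaining = model_text[len(make):].strip()
--             if remaining.startswith(('-', ' ', ',')):
--                 remaining = remaining.lstrip('-, ').strip()
--             # Capitalize properly
--             if ' ' in make:
--                 make_title = ' '.join(w.title() if w not in ['and', 'of', 'the'] else w for w in make.split())
--             else:
--                 make_title = make.title()
--             return make_title, remaining
--         # Check for multi-word makes
--         if len(make_words) > 1:
--             make_phrase = ' '.join(make_words)
--             if model_lower.startswith(make_phrase):
--                 remaining = model_text[len(make_phrase):].strip()
--                 if remaining.startswith(('-', ' ', ',')):
--                     remaining = remaining.lstrip('-, ').strip()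
--                 make_title = ' '.join(w.title() if w not in ['and', 'of', 'the'] else w for w in make_words)
--                 return make_title, remaining
--
--     return None, model_text
-- ===== SOURCE B (Python) =====
-- KNOWN_MAKES = {
--     'audi', 'bmw', 'mercedes-benz', 'mercedes', 'porsche', 'volkswagen', 'vw',
--     'ford', 'chevrolet', 'chevy', 'dodge', 'chrysler', 'cadillac', 'buick',
--     'pontiac', 'lincoln', 'gmc', 'jeep', 'ram', 'tesla', 'nissan', 'toyota',
--     'honda', 'mazda', 'subaru', 'mitsubishi', 'lexus', 'infiniti', 'acura',
--     'hyundai', 'kia', 'ferrari', 'lamborghini', 'mclaren', 'aston martin',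
--     'bentley', 'rolls-royce', 'rolls royce', 'jaguar', 'land rover', 'range rover',
--     'maserati', 'alfa romeo', 'bugatti', 'koenigsegg', 'pagani', 'lotus',
--     'suzuki', 'yamaha', 'kawasaki', 'ducati', 'harley-davidson', 'harley davidson',
--     'indian', 'triumph', 'aprilia', 'mv agusta', 'ktm', 'husqvarna',
--     'boeing', 'sikorsky', 'airbus', 'cessna', 'piper', 'bell', 'eurocopter',
--     'peterbilt', 'kenworth', 'mack', 'international', 'freightliner', 'volvo',
--     'man', 'iveco', 'scania', 'daimler', 'hummer', 'gurkha', 'terradyne',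
--     'howe', 'dartz', 'lenco', 'inkas', 'brabus', 'hennessey', 'saleen',
--     'ruf', 'mansory', 'novitec', 'liberty walk', 'rocket bunny', 'widebody'
-- }
--
-- _MAX_MAKE_LEN = max(map(len, KNOWN_MAKES))
--
-- def extract_make_from_model(model_text):
--     """Longest known-make prefix by scanning prefix LENGTHS of the lowered text
--     (one set lookup per length, longest first) instead of sorting the make set;
--     a prefix longer than the longest make cannot match, so lengths are capped there."""
--     if not model_text:
--         return None, model_text
--     ml = model_text.lower()
--     for L in range(min(len(ml), _MAX_MAKE_LEN), 0, -1):
--         prefix = ml[:L]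
--         if prefix in KNOWN_MAKES:
--             remaining = model_text[L:].strip().lstrip('-, ').strip()
--             return prefix.title(), remaining
--     return None, model_text
-- ===== Notes on version B (the rewrite author's own statement) =====
-- stated objective: alternative
-- what changed: B inverts the search: instead of length-sorting the whole make set and scanning it for the first prefix match (with a dead multi-word branch), it walks prefix LENGTHS of the lowered text from longest to shortest (capped at the longest make's length, since a longer prefix cannot match) with one set-membership lookup per length, so the sort and the scan over the 90 makes disappear; the same strip/lstrip and plain .title() follow (A's and/of/the exception never fires on the known makes).
-- outside the precondition, e.g. on extract_make_from_model(None): A returns (None, None), B returns (None, None)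
import Mathlib
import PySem

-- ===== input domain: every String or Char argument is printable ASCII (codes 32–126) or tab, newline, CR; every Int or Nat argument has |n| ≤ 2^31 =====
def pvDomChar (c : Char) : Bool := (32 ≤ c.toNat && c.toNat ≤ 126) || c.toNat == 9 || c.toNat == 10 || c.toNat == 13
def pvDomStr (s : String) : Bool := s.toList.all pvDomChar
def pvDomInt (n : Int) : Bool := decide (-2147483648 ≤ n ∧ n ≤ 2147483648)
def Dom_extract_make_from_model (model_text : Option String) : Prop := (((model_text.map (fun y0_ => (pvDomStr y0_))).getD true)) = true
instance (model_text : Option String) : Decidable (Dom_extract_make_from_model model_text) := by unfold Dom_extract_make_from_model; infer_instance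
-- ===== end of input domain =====

-- B inverts the search: A length-sorts the whole make set and scans it for the first prefix
-- match (with a dead multi-word branch); B walks prefix LENGTHS of the lowered text from longest
-- to shortest with one set-membership lookup per length; objective: alternative, same return values.

-- ===== PORT A =====
-- the Python set literal KNOWN_MAKES, in source order (all elements distinct)
def KNOWN_MAKES : PySem.Set String := PySem.Set.ofList
  ["audi", "bmw", "mercedes-benz", "mercedes", "porsche", "volkswagen", "vw",
   "ford", "chevrolet", "chevy", "dodge", "chrysler", "cadillac", "buick",
   "pontiac", "lincoln", "gmc", "jeep", "ram", "tesla", "nissan", "toyota",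
   "honda", "mazda", "subaru", "mitsubishi", "lexus", "infiniti", "acura",
   "hyundai", "kia", "ferrari", "lamborghini", "mclaren", "aston martin",
   "bentley", "rolls-royce", "rolls royce", "jaguar", "land rover", "range rover",
   "maserati", "alfa romeo", "bugatti", "koenigsegg", "pagani", "lotus",
   "suzuki", "yamaha", "kawasaki", "ducati", "harley-davidson", "harley davidson",
   "indian", "triumph", "aprilia", "mv agusta", "ktm", "husqvarna",
   "boeing", "sikorsky", "airbus", "cessna", "piper", "bell", "eurocopter",
   "peterbilt", "kenworth", "mack", "international", "freightliner", "volvo",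
   "man", "iveco", "scania", "daimler", "hummer", "gurkha", "terradyne",
   "howe", "dartz", "lenco", "inkas", "brabus", "hennessey", "saleen",
   "ruf", "mansory", "novitec", "liberty walk", "rocket bunny", "widebody"]

-- w.title(): hand port (PySem has no title); uppercase an alpha after a non-alpha, lowercase
-- an alpha after an alpha — exact for ASCII strings (Dom), where cased = alpha.
def pyTitleGo : List Char → Bool → List Char
  | [], _ => []
  | c :: rest, prevAlpha =>
    (if PySem.Chars.isalpha c then
       (if prevAlpha then PySem.Chars.lowerChar c else PySem.Chars.upperChar c)
     else c) :: pyTitleGo rest (PySem.Chars.isalpha c)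

def pyTitle (s : String) : String := String.ofList (pyTitleGo s.toList false)

-- s.lstrip('-, '): hand port, drop leading chars from {'-', ',', ' '} — exact
def pyLstripDashCommaSpace (s : String) : String :=
  String.ofList (s.toList.dropWhile (fun c => c = '-' || c = ',' || c = ' '))

-- ' '.join(w.title() if w not in ['and','of','the'] else w for w in ws)
def pvTitleWords (ws : List String) : String :=
  PySem.Str.join " " (ws.map (fun w => if w = "and" || w = "of" || w = "the" then w else pyTitle w))

-- A's conditional: if remaining.startswith(('-',' ',',')): remaining.lstrip('-, ').strip()
def pvPostA (remaining : String) : String :=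
  if PySem.Str.startswith remaining "-" || PySem.Str.startswith remaining " " ||
     PySem.Str.startswith remaining "," then
    PySem.Str.strip (pyLstripDashCommaSpace remaining)
  else remaining

-- remaining = model_text[len(make):].strip(), then the conditional lstrip
def pvRemainingA (model_text make : String) : String :=
  pvPostA (PySem.Str.strip (PySem.Str.slice model_text (some (PySem.Str.len make)) none))

-- the for-loop over sorted_makes
def pvLoopA (model_text model_lower : String) : List String → Option String × String
  | [] => (none, model_text)
  | make :: rest =>
    let make_words := PySem.Str.split₀ make
    if PySem.Str.startswith model_lower make then
      (some (if PySem.Str.isIn " " make then pvTitleWords (PySem.Str.split₀ make) else pyTitle make),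
       pvRemainingA model_text make)
    else if make_words.length > 1 then
      let make_phrase := PySem.Str.join " " make_words
      if PySem.Str.startswith model_lower make_phrase then
        (some (pvTitleWords make_words), pvRemainingA model_text make_phrase)
      else pvLoopA model_text model_lower rest
    else pvLoopA model_text model_lower rest

def extract_make_from_model (model_text : Option String) : Option String × String :=
  match model_text with
  | none => (none, "")  -- unreachable under Pre_: Python returns (None, None), not of the declared type
  | some s =>
    if s = "" then (none, s)
    else
      let model_lower := PySem.Str.lower s
      let sorted_makes := PySem.List.sorted KNOWN_MAKES (fun m => PySem.Str.len m) true
      pvLoopA s model_lower sorted_makes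

-- ===== PORT B =====
-- _MAX_MAKE_LEN = max(map(len, KNOWN_MAKES)) — max() of a set of ints is order-independent;
-- ported as the running-max fold over the element lengths
def pvMaxMakeLen : Nat := ((KNOWN_MAKES : List String).map (fun m => m.toList.length)).foldl max 0

-- for L in range(min(len(ml), _MAX_MAKE_LEN), 0, -1): if ml[:L] in KNOWN_MAKES: return ml[:L].title(), remaining
def pvLoopB (s : String) (ml : List Char) : Nat → Option String × String
  | 0 => (none, s)
  | Nat.succ L =>
    let pfx := String.ofList (ml.take (L + 1))
    if PySem.Set.contains KNOWN_MAKES pfx then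
      (some (pyTitle pfx),
       PySem.Str.strip (pyLstripDashCommaSpace
         (PySem.Str.strip (PySem.Str.slice s (some ((L + 1 : Nat) : Int)) none))))
    else pvLoopB s ml L

def extract_make_from_model_alt (model_text : Option String) : Option String × String :=
  match model_text with
  | none => (none, "")  -- unreachable under Pre_
  | some s =>
    if s = "" then (none, s)
    else
      let ml := (PySem.Str.lower s).toList
      pvLoopB s ml (min ml.length pvMaxMakeLen)

-- ===== PRECONDITION & SPEC =====
-- Pre_ excludes only model_text = None, where A returns (None, None): the second component is
-- not a String, so the result is not a value of the declared type Option String × String.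
def Pre_extract_make_from_model (model_text : Option String) : Prop := model_text ≠ none
instance (model_text : Option String) : Decidable (Pre_extract_make_from_model model_text) := by
  unfold Pre_extract_make_from_model; infer_instance
def pvWitness_extract_make_from_model : Option String := some "ford F-150"

def Spec_extract_make_from_model (model_text : Option String) (out : Option String × String) : Prop := out = extract_make_from_model_alt model_text
instance (model_text : Option String) (out : Option String × String) : Decidable (Spec_extract_make_from_model model_text out) := by unfold Spec_extract_make_from_model; infer_instance

-- ===== CLAIM (what is proved, stated in full; the proofs are below) =====
def Claim_equal_extract_make_from_model : Prop := ∀ (model_text : Option String), Dom_extract_make_from_model model_text → Pre_extract_make_from_model model_text → Spec_extract_make_from_model model_text (extract_make_from_model model_text)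

-- ===== LEMMAS AND PROOFS =====

-- two prefixes of the same string with equal length are equal
theorem pv_startswith_len_eq {t x y : String}
    (hx : PySem.Str.startswith t x = true) (hy : PySem.Str.startswith t y = true)
    (h : PySem.Str.len x = PySem.Str.len y) : x = y := by
  simp only [PySem.Str.startswith_eq, PySem.Chars.startswith_iff] at hx hy
  simp only [PySem.Str.len_eq, Int.natCast_inj] at h
  exact String.toList_inj.mp
    ((List.prefix_of_prefix_length_le hx hy h.le).eq_of_length h)

-- strip is idempotent
theorem pv_lstrip_idem (l : List Char) :
    PySem.Chars.lstrip (PySem.Chars.lstrip l) = PySem.Chars.lstrip l := by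
  simp only [PySem.Chars.lstrip]
  exact List.dropWhile_idempotent _ l

theorem pv_rstrip_prefix (l : List Char) : PySem.Chars.rstrip l <+: l := by
  have h := List.reverse_prefix.mpr
    (List.dropWhile_suffix (l := l.reverse) PySem.Chars.isspace)
  simpa [PySem.Chars.rstrip] using h

theorem pv_lstrip_of_lstripped {l : List Char} (h : PySem.Chars.lstrip l = l) :
    PySem.Chars.lstrip (PySem.Chars.rstrip l) = PySem.Chars.rstrip l := by
  rcases hr : PySem.Chars.rstrip l with _ | ⟨c, t⟩
  · simp [PySem.Chars.lstrip]
  · rcases l with _ | ⟨a, u⟩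
    · simp [PySem.Chars.rstrip] at hr
    · have hpre : (c :: t) <+: (a :: u) := hr ▸ pv_rstrip_prefix (a :: u)
      have hca : c = a := by
        rcases hpre with ⟨w, hw⟩
        exact (List.cons_eq_cons.mp hw.symm).1.symm
      have ha : PySem.Chars.isspace a = false := by
        by_contra hsp
        simp only [Bool.not_eq_false] at hsp
        simp only [PySem.Chars.lstrip, List.dropWhile_cons, hsp, if_true] at h
        have hlen := congrArg List.length h
        have hle := List.length_dropWhile_le (p := PySem.Chars.isspace) (l := u)
        simp at hlen
        omega
      simp [PySem.Chars.lstrip, hca, ha]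

theorem pv_rstrip_idem (l : List Char) :
    PySem.Chars.rstrip (PySem.Chars.rstrip l) = PySem.Chars.rstrip l := by
  simp only [PySem.Chars.rstrip, List.reverse_reverse]
  rw [List.dropWhile_idempotent]

theorem pv_strip_idem (l : List Char) :
    PySem.Chars.strip (PySem.Chars.strip l) = PySem.Chars.strip l := by
  simp only [PySem.Chars.strip]
  rw [pv_lstrip_of_lstripped (pv_lstrip_idem l), pv_rstrip_idem]

-- A's conditional lstrip('-, ').strip() after a strip equals B's unconditional one
theorem pv_post_eq' (r : String) (hstr : PySem.Chars.strip r.toList = r.toList) :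
    pvPostA r = PySem.Str.strip (pyLstripDashCommaSpace r) := by
  unfold pvPostA
  split_ifs with hcond
  · rfl
  · -- r starts with none of '-', ' ', ',': the lstrip drops nothing and strip fixes r
    have h1 : PySem.Str.startswith r "-" = false := by
      cases h : PySem.Str.startswith r "-" with
      | false => rfl
      | true => exact absurd (by rw [h]; simp) hcond
    have h2 : PySem.Str.startswith r " " = false := by
      cases h : PySem.Str.startswith r " " with
      | false => rfl
      | true => exact absurd (by rw [h]; simp) hcond
    have h3 : PySem.Str.startswith r "," = false := by
      cases h : PySem.Str.startswith r "," with
      | false => rfl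
      | true => exact absurd (by rw [h]; simp) hcond
    have hdrop : r.toList.dropWhile (fun c => c = '-' || c = ',' || c = ' ') = r.toList := by
      rcases hl : r.toList with _ | ⟨c, cs⟩
      · rfl
      · have hne : ∀ ch : Char, PySem.Chars.startswith r.toList [ch] = false → c ≠ ch := by
          intro ch hsw hccl
          have hT : PySem.Chars.startswith r.toList [ch] = true := by
            rw [PySem.Chars.startswith_iff, hl, hccl]
            exact ⟨cs, rfl⟩
          rw [hT] at hsw
          cases hsw
        have hd : c ≠ '-' := hne '-' h1
        have hsp : c ≠ ' ' := hne ' ' h2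
        have hcm : c ≠ ',' := hne ',' h3
        rw [List.dropWhile_cons]
        simp [hd, hsp, hcm]
    unfold pyLstripDashCommaSpace
    rw [hdrop]
    apply String.toList_inj.mp
    rw [String.ofList_toList, PySem.Str.toList_strip]
    exact hstr.symm

-- A's conditional lstrip('-, ').strip() after a strip equals B's unconditional one
theorem pv_post_eq (t : String) :
    pvPostA (PySem.Str.strip t) =
      PySem.Str.strip (pyLstripDashCommaSpace (PySem.Str.strip t)) := by
  apply pv_post_eq'
  rw [PySem.Str.toList_strip]
  exact pv_strip_idem _

-- every known make is its own ' '.join(split()) (no double/leading/trailing spaces)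
set_option maxRecDepth 40000 in
theorem pv_phrase_eq : ∀ m ∈ (KNOWN_MAKES : List String),
    PySem.Str.join " " (PySem.Str.split₀ m) = m := by decide

-- A's per-make title-casing (the and/of/the exception never fires on the known makes) = plain title()
set_option maxRecDepth 40000 in
theorem pv_title_eq : ∀ m ∈ (KNOWN_MAKES : List String),
    (if PySem.Str.isIn " " m then pvTitleWords (PySem.Str.split₀ m) else pyTitle m) = pyTitle m := by
  decide

-- no known make is the empty string
set_option maxRecDepth 40000 in
theorem pv_makes_nonempty : ∀ m ∈ (KNOWN_MAKES : List String), m.toList ≠ [] := by decide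

-- no known make is longer than the computed cap
set_option maxRecDepth 40000 in
theorem pv_makes_len_le : ∀ m ∈ (KNOWN_MAKES : List String), m.toList.length ≤ pvMaxMakeLen := by
  decide

-- A's loop returns the FIRST match of the list (the multi-word branch is dead on this list)
theorem pv_loopA_char (model_text model_lower : String) (l : List String)
    (hl : ∀ m ∈ l, PySem.Str.join " " (PySem.Str.split₀ m) = m) :
    pvLoopA model_text model_lower l =
      match l.find? (fun m => PySem.Str.startswith model_lower m) with
      | none => (none, model_text)
      | some make =>
        (some (if PySem.Str.isIn " " make then pvTitleWords (PySem.Str.split₀ make) else pyTitle make),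
         pvRemainingA model_text make) := by
  induction l with
  | nil => rfl
  | cons make rest ih =>
    have hmake := hl make (List.mem_cons_self ..)
    have hrest : ∀ m ∈ rest, PySem.Str.join " " (PySem.Str.split₀ m) = m :=
      fun m hm => hl m (List.mem_cons_of_mem _ hm)
    by_cases hsw : PySem.Str.startswith model_lower make = true
    · rw [List.find?_cons_of_pos (by simpa using hsw)]
      simp only [pvLoopA, hsw, if_true]
    · have hsw' : PySem.Str.startswith model_lower make = false := by
        simpa using hsw
      have hsw2 : PySem.Chars.startswith model_lower.toList make.toList = false := hsw'
      rw [List.find?_cons_of_neg (by simp [hsw2])]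
      simp only [pvLoopA, hsw', Bool.false_eq_true, if_false]
      rw [hmake, hsw']
      simp only [Bool.false_eq_true, if_false]
      split_ifs with hlen
      · exact ih hrest
      · exact ih hrest

-- first match of the length-descending sort = first longest element of the filtered list
theorem pv_sel_eq (t : String) (l : List String) :
    (PySem.List.sorted l (fun m => PySem.Str.len m) true).find?
        (fun m => PySem.Str.startswith t m)
      = PySem.List.max? (l.filter (fun m => PySem.Str.startswith t m))
          (fun m => PySem.Str.len m) := by
  set key : String → Int := fun m => PySem.Str.len m with hkey
  set P : String → Bool := fun m => PySem.Str.startswith t m with hP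
  set sl := PySem.List.sorted l key true with hsl
  have hperm : sl.Perm l := PySem.List.sorted_perm l key true
  rcases hfind : sl.find? P with _ | a
  · rw [List.find?_eq_none] at hfind
    have hnil : l.filter P = [] := by
      rw [List.filter_eq_nil_iff]
      exact fun m hm => hfind m (hperm.mem_iff.mpr hm)
    rw [hnil]
    rfl
  · rw [List.find?_eq_some_iff_append] at hfind
    obtain ⟨hPa, as_, bs_, hdecomp, hbefore⟩ := hfind
    have hmem_a_l : a ∈ l := hperm.mem_iff.mp (by rw [hdecomp]; simp)
    have hpair : sl.Pairwise (fun x y => key y ≤ key x) := PySem.List.sorted_pairwise_rev l key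
    rw [hdecomp] at hpair
    have hpair2 : (a :: bs_).Pairwise (fun x y => key y ≤ key x) :=
      (List.pairwise_append.mp hpair).2.1
    have hafter : ∀ y ∈ bs_, key y ≤ key a := (List.pairwise_cons.mp hpair2).1
    have hmax_a : ∀ y ∈ l, P y = true → key y ≤ key a := by
      intro y hy hPy
      have hy' : y ∈ as_ ++ a :: bs_ := by
        rw [← hdecomp]; exact hperm.mem_iff.mpr hy
      rcases List.mem_append.mp hy' with hy1 | hy2
      · exact absurd hPy (by simpa using hbefore y hy1)
      · rcases List.mem_cons.mp hy2 with rfl | hy3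
        · exact le_refl _
        · exact hafter y hy3
    have hafilter : a ∈ l.filter P := List.mem_filter.mpr ⟨hmem_a_l, hPa⟩
    rcases hmax : PySem.List.max? (l.filter P) key with _ | b
    · rw [PySem.List.max?_eq_none_iff] at hmax
      rw [hmax] at hafilter
      simp at hafilter
    · have hbmem := PySem.List.max?_mem hmax
      obtain ⟨hb_l, hPb⟩ := List.mem_filter.mp hbmem
      have h1 : key a ≤ key b := PySem.List.max?_isMax hmax a hafilter
      have h2 : key b ≤ key a := hmax_a b hb_l hPb
      have hab : a = b := pv_startswith_len_eq hPa hPb (le_antisymm h1 h2)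
      rw [hab]

-- B's countdown over prefix lengths = first longest element of the filtered list
theorem pv_loopB_char (s t : String) (n : Nat) (hn : n ≤ t.toList.length)
    (hmaxlen : ∀ m ∈ (KNOWN_MAKES : List String),
      PySem.Str.startswith t m = true → m.toList.length ≤ n) :
    pvLoopB s t.toList n =
      match PySem.List.max?
          ((KNOWN_MAKES : List String).filter (fun m => PySem.Str.startswith t m))
          (fun m => PySem.Str.len m) with
      | none => (none, s)
      | some best =>
        (some (pyTitle best),
         PySem.Str.strip (pyLstripDashCommaSpace
           (PySem.Str.strip (PySem.Str.slice s (some (PySem.Str.len best)) none)))) := by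
  induction n with
  | zero =>
    have hnil : (KNOWN_MAKES : List String).filter (fun m => PySem.Str.startswith t m) = [] := by
      rw [List.filter_eq_nil_iff]
      intro m hm hP
      have h0 := hmaxlen m hm hP
      exact absurd (List.length_eq_zero_iff.mp (Nat.le_zero.mp h0)) (pv_makes_nonempty m hm)
    rw [hnil]
    rfl
  | succ L ih =>
    have hq_pre : t.toList.take (L + 1) <+: t.toList := List.take_prefix _ _
    have hq_len : (t.toList.take (L + 1)).length = L + 1 := List.length_take_of_le hn
    have hq_toList : (String.ofList (t.toList.take (L + 1))).toList = t.toList.take (L + 1) := by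
      simp
    by_cases hc : PySem.Set.contains KNOWN_MAKES (String.ofList (t.toList.take (L + 1))) = true
    · -- the prefix of length L+1 is a known make: it is the unique longest match
      have hqmem : String.ofList (t.toList.take (L + 1)) ∈ (KNOWN_MAKES : List String) :=
        (PySem.Set.contains_iff _ _).mp hc
      have hqsw : PySem.Str.startswith t (String.ofList (t.toList.take (L + 1))) = true := by
        rw [PySem.Str.startswith_eq, PySem.Chars.startswith_iff, hq_toList]
        exact hq_pre
      have hqfilter : String.ofList (t.toList.take (L + 1)) ∈ (KNOWN_MAKES : List String).filter
          (fun m => PySem.Str.startswith t m) := List.mem_filter.mpr ⟨hqmem, hqsw⟩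
      rcases hmax : PySem.List.max?
          ((KNOWN_MAKES : List String).filter (fun m => PySem.Str.startswith t m))
          (fun m => PySem.Str.len m) with _ | best
      · rw [PySem.List.max?_eq_none_iff] at hmax
        rw [hmax] at hqfilter
        simp at hqfilter
      · have hbmem := PySem.List.max?_mem hmax
        obtain ⟨hb_l, hPb⟩ := List.mem_filter.mp hbmem
        have hql : PySem.Str.len (String.ofList (t.toList.take (L + 1))) = ((L + 1 : Nat) : Int) := by
          rw [PySem.Str.len_eq, hq_toList, hq_len]
        have h1 : PySem.Str.len (String.ofList (t.toList.take (L + 1))) ≤ PySem.Str.len best :=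
          PySem.List.max?_isMax hmax _ hqfilter
        have h2 : PySem.Str.len best ≤ PySem.Str.len (String.ofList (t.toList.take (L + 1))) := by
          rw [hql, PySem.Str.len_eq]
          exact_mod_cast hmaxlen best hb_l hPb
        have hqb : String.ofList (t.toList.take (L + 1)) = best :=
          pv_startswith_len_eq hqsw hPb (le_antisymm h1 h2)
        simp only [pvLoopB]
        rw [if_pos hc, ← hqb, hql]
    · -- no make of length L+1 matches: the bound drops to L
      have hmaxlen' : ∀ m ∈ (KNOWN_MAKES : List String),
          PySem.Str.startswith t m = true → m.toList.length ≤ L := by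
        intro m hm hP
        have hle := hmaxlen m hm hP
        rcases Nat.lt_or_ge m.toList.length (L + 1) with hlt | hge
        · omega
        · exfalso
          have heq : m.toList.length = L + 1 := le_antisymm hle hge
          have hmp : m.toList <+: t.toList := by
            rw [PySem.Str.startswith_eq, PySem.Chars.startswith_iff] at hP
            exact hP
          have hmq : m.toList = t.toList.take (L + 1) := by
            rw [List.prefix_iff_eq_take.mp hmp, heq]
          have hm2 : String.ofList (t.toList.take (L + 1)) ∈ (KNOWN_MAKES : List String) := by
            rw [← hmq, String.ofList_toList]
            exact hm
          exact hc ((PySem.Set.contains_iff _ _).mpr hm2)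
      simp only [pvLoopB]
      rw [if_neg hc]
      exact ih (Nat.le_of_succ_le hn) hmaxlen'

-- ===== VERDICT (by name: the statement is the Claim_ definition above) =====
set_option maxRecDepth 40000 in
theorem extract_make_from_model_spec : Claim_equal_extract_make_from_model := by
  intro model_text _ hpre
  unfold Spec_extract_make_from_model
  match model_text with
  | none => exact absurd rfl hpre
  | some s =>
    by_cases hs : s = ""
    · subst hs; rfl
    · have hA : extract_make_from_model (some s) =
          pvLoopA s (PySem.Str.lower s)
            (PySem.List.sorted (KNOWN_MAKES : List String) (fun m => PySem.Str.len m) true) := by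
        simp only [extract_make_from_model]
        rw [if_neg hs]
      have hB : extract_make_from_model_alt (some s) =
          pvLoopB s (PySem.Str.lower s).toList
            (min (PySem.Str.lower s).toList.length pvMaxMakeLen) := by
        simp only [extract_make_from_model_alt]
        rw [if_neg hs]
      rw [hA, hB]
      rw [pv_loopA_char _ _ _ (fun m hm =>
        pv_phrase_eq m ((PySem.List.sorted_perm (KNOWN_MAKES : List String) _ true).mem_iff.mp hm))]
      rw [pv_sel_eq (PySem.Str.lower s) (KNOWN_MAKES : List String)]
      rw [pv_loopB_char s (PySem.Str.lower s) _ (Nat.min_le_left _ _)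
        (fun m hm hP => by
          rw [PySem.Str.startswith_eq, PySem.Chars.startswith_iff] at hP
          exact Nat.le_min.mpr ⟨hP.length_le, pv_makes_len_le m hm⟩)]
      rcases hmax : PySem.List.max?
          ((KNOWN_MAKES : List String).filter
            (fun m => PySem.Str.startswith (PySem.Str.lower s) m))
          (fun m => PySem.Str.len m) with _ | best
      · rfl
      · have hbestmem : best ∈ (KNOWN_MAKES : List String) :=
          (List.mem_filter.mp (PySem.List.max?_mem hmax)).1
        show (some (if PySem.Str.isIn " " best then pvTitleWords (PySem.Str.split₀ best)
                    else pyTitle best),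
              pvRemainingA s best)
          = (some (pyTitle best),
             PySem.Str.strip (pyLstripDashCommaSpace
               (PySem.Str.strip (PySem.Str.slice s (some (PySem.Str.len best)) none))))
        rw [pv_title_eq best hbestmem]
        unfold pvRemainingA
        rw [pv_post_eq]
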